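-- pv_equiv track=rewrite | github.com/p-lots/codewars | 7-kyu/speed-limit/python/solution.py | speed_limit
-- ===== SOURCE A (Python) =====
-- def speed_limit(speed, signals):
--     total_fine = 0
--     for signal in signals:
--         overage = speed - signal
--         if 10 <= overage <= 19:
--             total_fine += 100
--         elif 20 <= overage <= 29:
--             total_fine += 250
--         elif overage >= 30:
--             total_fine += 500
--     return total_fine
-- ===== SOURCE B (Python) =====
-- # Table-driven: fine is a sum of step increments at thresholds 10/20/30 (100+150+250 = 500 top tier).
-- STEPS = ((10, 100), (20, 150), (30, 250))
--
-- def speed_limit(speed, signals):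
--     return sum(inc for sig in signals for t, inc in STEPS if speed - sig >= t)
-- ===== Notes on version B (the rewrite author's own statement) =====
-- stated objective: simpler
-- what changed: Replaces the chained if/elif branches with a data table of threshold/increment steps summed in one generator expression (the step function becomes cumulative data rather than control flow).
import Mathlib
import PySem

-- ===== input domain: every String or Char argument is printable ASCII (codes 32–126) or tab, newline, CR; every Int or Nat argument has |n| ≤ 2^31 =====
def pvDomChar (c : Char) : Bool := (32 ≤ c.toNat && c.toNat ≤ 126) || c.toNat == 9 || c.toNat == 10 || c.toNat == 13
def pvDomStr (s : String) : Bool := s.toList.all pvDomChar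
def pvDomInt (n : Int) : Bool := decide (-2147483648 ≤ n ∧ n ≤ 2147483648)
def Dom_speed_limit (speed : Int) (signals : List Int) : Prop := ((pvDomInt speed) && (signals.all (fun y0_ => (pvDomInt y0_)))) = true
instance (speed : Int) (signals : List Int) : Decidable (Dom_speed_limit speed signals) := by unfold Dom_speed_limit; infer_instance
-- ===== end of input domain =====

-- B replaces A's if/elif chain by a data table of cumulative threshold/increment steps summed in one pass (simpler).


-- ===== PORT A =====
def speed_limit (speed : Int) (signals : List Int) : Int :=
  signals.foldl (fun total_fine signal =>
    let overage := speed - signal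
    if 10 ≤ overage ∧ overage ≤ 19 then total_fine + 100
    else if 20 ≤ overage ∧ overage ≤ 29 then total_fine + 250
    else if overage ≥ 30 then total_fine + 500
    else total_fine) 0

-- ===== PORT B =====
def pvSteps : List (Int × Int) := [(10, 100), (20, 150), (30, 250)]

def speed_limit_alt (speed : Int) (signals : List Int) : Int :=
  (signals.flatMap (fun sig =>
    pvSteps.filterMap (fun p => if speed - sig ≥ p.1 then some p.2 else none))).sum

-- ===== PRECONDITION & SPEC =====
def Spec_speed_limit (speed : Int) (signals : List Int) (out : Int) : Prop := out = speed_limit_alt speed signals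
instance (speed : Int) (signals : List Int) (out : Int) : Decidable (Spec_speed_limit speed signals out) := by unfold Spec_speed_limit; infer_instance

-- ===== CLAIM (what is proved, stated in full; the proofs are below) =====
def Claim_equal_speed_limit : Prop := ∀ (speed : Int) (signals : List Int), Dom_speed_limit speed signals → Spec_speed_limit speed signals (speed_limit speed signals)

-- ===== LEMMAS AND PROOFS =====

-- per-signal: A's branch adds exactly the sum of B's table increments for that signal
theorem pv_per_sig (speed sig t : Int) :
    (if 10 ≤ speed - sig ∧ speed - sig ≤ 19 then t + 100
     else if 20 ≤ speed - sig ∧ speed - sig ≤ 29 then t + 250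
     else if speed - sig ≥ 30 then t + 500
     else t)
    = t + (pvSteps.filterMap (fun p => if speed - sig ≥ p.1 then some p.2 else none)).sum := by
  simp only [pvSteps, List.filterMap]
  split_ifs <;> simp <;> omega

theorem pv_main (speed : Int) (signals : List Int) (t : Int) :
    signals.foldl (fun total_fine signal =>
      let overage := speed - signal
      if 10 ≤ overage ∧ overage ≤ 19 then total_fine + 100
      else if 20 ≤ overage ∧ overage ≤ 29 then total_fine + 250
      else if overage ≥ 30 then total_fine + 500
      else total_fine) t
    = t + (signals.flatMap (fun sig =>
        pvSteps.filterMap (fun p => if speed - sig ≥ p.1 then some p.2 else none))).sum := by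
  induction signals generalizing t with
  | nil => simp
  | cons x xs ih =>
    simp only [List.foldl_cons, List.flatMap_cons, List.sum_append]
    rw [ih, pv_per_sig speed x t]
    ring

-- ===== VERDICT (by name: the statement is the Claim_ definition above) =====
theorem speed_limit_spec : Claim_equal_speed_limit := by
  intro speed signals _
  unfold Spec_speed_limit speed_limit speed_limit_alt
  simpa using pv_main speed signals 0
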